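-- pv_equiv track=rewrite | github.com/andxeg/qBraid_GPU4Quantum_Challenge_2025 | gpt-qaoa/inference.py | get_max_token_count_qokit
-- ===== SOURCE A (Python) =====
-- def get_max_token_count_qokit(n: int) -> int:
--     token_map = {
--         5: 820,
--         10: 2050,
--         15: 4100,
--         20: 7175,
--         25: 10660,
--         30: 14350
--     }
--
--     sorted_keys = sorted(token_map.keys())
--     for k in sorted_keys:
--         if n <= k:
--             return token_map[k]
--
--     # If n is greater than all keys, use the largest
--     return token_map[sorted_keys[-1]]
-- ===== SOURCE B (Python) =====
-- def get_max_token_count_qokit(n: int) -> int: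
--     keys = [5, 10, 15, 20, 25, 30]
--     vals = [820, 2050, 4100, 7175, 10660, 14350]
--     lo, hi = 0, len(keys)
--     while lo < hi:
--         mid = (lo + hi) // 2
--         if keys[mid] < n:
--             lo = mid + 1
--         else:
--             hi = mid
--     return vals[min(lo, len(keys) - 1)]
-- ===== Notes on version B (the rewrite author's own statement) =====
-- stated objective: alternative
-- what changed: Replaces the dict plus linear scan of sorted keys with two parallel sorted lists and a hand-written binary search (bisect_left) whose out-of-range index is clamped to the last entry.
import Mathlib
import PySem

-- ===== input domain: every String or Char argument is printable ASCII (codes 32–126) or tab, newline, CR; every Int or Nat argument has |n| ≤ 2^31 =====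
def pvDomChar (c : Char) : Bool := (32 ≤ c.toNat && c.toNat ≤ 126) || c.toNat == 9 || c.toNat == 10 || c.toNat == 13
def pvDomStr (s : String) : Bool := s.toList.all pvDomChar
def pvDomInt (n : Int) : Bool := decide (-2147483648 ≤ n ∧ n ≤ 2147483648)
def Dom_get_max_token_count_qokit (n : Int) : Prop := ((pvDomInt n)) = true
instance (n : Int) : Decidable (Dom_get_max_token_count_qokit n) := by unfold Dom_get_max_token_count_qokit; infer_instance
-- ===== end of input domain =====

-- B replaces the dict + linear scan with parallel sorted lists and a binary search (alternative decomposition, same result).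


-- ===== PORT A =====
def pvTokenMapA : PySem.Dict Int Int :=
  PySem.Dict.ofList [(5, 820), (10, 2050), (15, 4100), (20, 7175), (25, 10660), (30, 14350)]

-- the 'for k in sorted_keys: if n <= k: return token_map[k]' loop
def pvLoopA (n : Int) : List Int → Option Int
  | [] => none
  | k :: ks => if n ≤ k then pvTokenMapA.get? k else pvLoopA n ks

def get_max_token_count_qokit (n : Int) : Int :=
  let sorted_keys := PySem.List.sorted pvTokenMapA.keys (fun x => x) false
  match pvLoopA n sorted_keys with
  | some v => v
  -- fallback: token_map[sorted_keys[-1]] (KeyError impossible: the key comes from the map; getD 0 is never the taken branch)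
  | none => ((PySem.List.pyGet? sorted_keys (-1)).bind pvTokenMapA.get?).getD 0

-- ===== PORT B =====
-- the while-loop of Source B: bisect_left on keys, state (lo, hi)
def pvBisect (keys : List Int) (n : Int) (lo hi : Nat) : Nat :=
  if h : lo < hi then
    let mid := (lo + hi) / 2
    if keys.getD mid 0 < n then pvBisect keys n (mid + 1) hi
    else pvBisect keys n lo mid
  else lo
termination_by hi - lo
decreasing_by all_goals omega

def get_max_token_count_qokit_alt (n : Int) : Int :=
  let keys : List Int := [5, 10, 15, 20, 25, 30]
  let vals : List Int := [820, 2050, 4100, 7175, 10660, 14350]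
  let lo := pvBisect keys n 0 keys.length
  vals.getD (min lo (keys.length - 1)) 0

-- ===== PRECONDITION & SPEC =====
def Spec_get_max_token_count_qokit (n : Int) (out : Int) : Prop := out = get_max_token_count_qokit_alt n
instance (n : Int) (out : Int) : Decidable (Spec_get_max_token_count_qokit n out) := by unfold Spec_get_max_token_count_qokit; infer_instance

-- ===== CLAIM =====
def Claim_equal_get_max_token_count_qokit : Prop := ∀ (n : Int), Dom_get_max_token_count_qokit n → Spec_get_max_token_count_qokit n (get_max_token_count_qokit n)

-- ===== LEMMAS AND PROOFS =====

-- ===== VERDICT =====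
theorem get_max_token_count_qokit_spec : Claim_equal_get_max_token_count_qokit := by
  intro n _
  unfold Spec_get_max_token_count_qokit get_max_token_count_qokit get_max_token_count_qokit_alt
  have hs : PySem.List.sorted pvTokenMapA.keys (fun x => x) false = [5, 10, 15, 20, 25, 30] := by decide
  rw [hs]
  by_cases h5 : n ≤ 5
  · simp [pvLoopA, pvBisect, pvTokenMapA, show ¬((5:Int) < n) by omega, show n ≤ (5:Int) by omega, show ¬((10:Int) < n) by omega, show ¬((20:Int) < n) by omega]
    try decide
  · by_cases h10 : n ≤ 10
    · simp [pvLoopA, pvBisect, pvTokenMapA, show (5:Int) < n by omega, show ¬(n ≤ (5:Int)) by omega, show ¬((10:Int) < n) by omega, show n ≤ (10:Int) by omega, show ¬((20:Int) < n) by omega]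
      try decide
    · by_cases h15 : n ≤ 15
      · simp [pvLoopA, pvBisect, pvTokenMapA, show ¬(n ≤ (5:Int)) by omega, show (10:Int) < n by omega, show ¬(n ≤ (10:Int)) by omega, show ¬((15:Int) < n) by omega, show n ≤ (15:Int) by omega, show ¬((20:Int) < n) by omega]
        try decide
      · by_cases h20 : n ≤ 20
        · simp [pvLoopA, pvBisect, pvTokenMapA, show ¬(n ≤ (5:Int)) by omega, show (10:Int) < n by omega, show ¬(n ≤ (10:Int)) by omega, show (15:Int) < n by omega, show ¬(n ≤ (15:Int)) by omega, show ¬((20:Int) < n) by omega, show n ≤ (20:Int) by omega]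
          try decide
        · by_cases h25 : n ≤ 25
          · simp [pvLoopA, pvBisect, pvTokenMapA, show ¬(n ≤ (5:Int)) by omega, show ¬(n ≤ (10:Int)) by omega, show ¬(n ≤ (15:Int)) by omega, show (20:Int) < n by omega, show ¬(n ≤ (20:Int)) by omega, show ¬((25:Int) < n) by omega, show n ≤ (25:Int) by omega, show ¬((30:Int) < n) by omega]
            try decide
          · by_cases h30 : n ≤ 30
            · simp [pvLoopA, pvBisect, pvTokenMapA, show ¬(n ≤ (5:Int)) by omega, show ¬(n ≤ (10:Int)) by omega, show ¬(n ≤ (15:Int)) by omega, show (20:Int) < n by omega, show ¬(n ≤ (20:Int)) by omega, show (25:Int) < n by omega, show ¬(n ≤ (25:Int)) by omega, show ¬((30:Int) < n) by omega, show n ≤ (30:Int) by omega]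
              try decide
            · simp [pvLoopA, pvBisect, pvTokenMapA, PySem.List.pyGet?, PySem.List.pyIdx?, show ¬(n ≤ (5:Int)) by omega, show ¬(n ≤ (10:Int)) by omega, show ¬(n ≤ (15:Int)) by omega, show (20:Int) < n by omega, show ¬(n ≤ (20:Int)) by omega, show ¬(n ≤ (25:Int)) by omega, show (30:Int) < n by omega, show ¬(n ≤ (30:Int)) by omega]
              try decide
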